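-- pv_equiv track=rewrite | github.com/guadalupesilva1/repositorio_programacion | funciones_habitos.py | analizar_habitos
-- ===== SOURCE A (Python) =====
-- def analizar_habitos(lista):
--     diccionario = {}
--     for actividad in lista:
--         if actividad not in diccionario:
--             diccionario[actividad] = 1
--         else:
--             diccionario[actividad] += 1
--     return diccionario
-- ===== SOURCE B (Python) =====
-- def analizar_habitos(lista):
--     # Distinct activities in first-occurrence order, then count each by scanning the list.
--     return {actividad: lista.count(actividad) for actividad in dict.fromkeys(lista)}
-- ===== Notes on version B (the rewrite author's own statement) =====
-- stated objective: alternative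
-- what changed: Replaces the single accumulating dict pass with a unique-keys pass (dict.fromkeys) followed by counting each distinct activity with lista.count, a different O(n*k) traversal shape.
import Mathlib
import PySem

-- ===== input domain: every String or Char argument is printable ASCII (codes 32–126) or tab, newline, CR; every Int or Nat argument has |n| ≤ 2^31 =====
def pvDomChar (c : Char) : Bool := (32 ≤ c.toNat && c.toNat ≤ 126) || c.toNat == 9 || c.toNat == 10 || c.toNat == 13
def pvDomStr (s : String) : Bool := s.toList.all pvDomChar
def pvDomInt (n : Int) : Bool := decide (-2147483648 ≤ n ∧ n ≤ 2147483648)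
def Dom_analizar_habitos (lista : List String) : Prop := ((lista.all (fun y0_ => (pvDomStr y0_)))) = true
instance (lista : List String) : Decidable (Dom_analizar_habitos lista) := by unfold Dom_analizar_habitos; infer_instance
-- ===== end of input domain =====

-- B counts each distinct activity (first-occurrence order) by scanning the list, instead of A's single accumulating dict pass; alternative decomposition, return value identical.

-- ===== PORT A =====
-- A builds a dict in one pass: first sight inserts 1, later sights increment.
def analizar_habitos (lista : List String) : List (String × Int) :=
  (lista.foldl
    (fun d actividad =>
      if d.contains actividad = false then
        d.insert actividad 1
      else
        d.modify actividad 0 (· + 1))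
    (PySem.Dict.empty : PySem.Dict String Int)).items

-- ===== PORT B =====
-- B: distinct activities in first-occurrence order (dict.fromkeys = PySem.List.dedup), then count each with lista.count.
def analizar_habitos_alt (lista : List String) : List (String × Int) :=
  (PySem.List.dedup lista).map (fun actividad => (actividad, (lista.count actividad : Int)))

-- ===== PRECONDITION & SPEC =====
def Spec_analizar_habitos (lista : List String) (out : List (String × Int)) : Prop := out = analizar_habitos_alt lista
instance (lista : List String) (out : List (String × Int)) : Decidable (Spec_analizar_habitos lista out) := by unfold Spec_analizar_habitos; infer_instance

-- ===== CLAIM (what is proved, stated in full; the proofs are below) =====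
def Claim_equal_analizar_habitos : Prop := ∀ (lista : List String), Dom_analizar_habitos lista → Spec_analizar_habitos lista (analizar_habitos lista)

-- ===== LEMMAS AND PROOFS =====

-- A's step (insert-1 on a fresh key, increment otherwise) is exactly Counter's modify step.
theorem analizar_step_eq (d : PySem.Dict String Int) (a : String) :
    (if d.contains a = false then d.insert a 1 else d.modify a 0 (· + 1)) = d.modify a 0 (· + 1) := by
  by_cases h : d.contains a = false
  · simp only [h, if_true, PySem.Dict.modify, PySem.Dict.getD_of_not_contains d 0 h]
    norm_num
  · simp [h]

theorem analizar_foldl_eq (lista : List String) :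
    lista.foldl
      (fun d actividad =>
        if d.contains actividad = false then d.insert actividad 1
        else d.modify actividad 0 (· + 1))
      (PySem.Dict.empty : PySem.Dict String Int)
    = PySem.Dict.counter lista := by
  rw [PySem.Dict.counter_eq_foldl]
  exact PySem.List.foldl_congr_mem lista _ _ _ (fun d a _ => analizar_step_eq d a)

-- ===== VERDICT (by name: the statement is the Claim_ definition above) =====
theorem analizar_habitos_spec : Claim_equal_analizar_habitos := by
  intro lista _
  show analizar_habitos lista = analizar_habitos_alt lista
  unfold analizar_habitos analizar_habitos_alt
  rw [analizar_foldl_eq, PySem.Dict.items_counter]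
  simp [PySem.List.dedup_eq_ofList]
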